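-- pv_equiv track=rewrite | github.com/grantdupreez/outreach | app.py | extract_seniority
-- ===== SOURCE A (Python) =====
-- def extract_seniority(position):
--     """Extract seniority level based on job position"""
--     position_lower = position.lower()
--
--     if any(exec_title in position_lower for exec_title in ["ceo", "cto", "cfo", "coo", "chief", "president", "founder"]):
--         return "C-Suite"
--     elif any(vp in position_lower for vp in ["vp", "vice president"]):
--         return "VP"
--     elif any(dir in position_lower for dir in ["director", "head of"]):
--         return "Director"
--     elif any(mgr in position_lower for mgr in ["manager", "lead", "principal"]):
--         return "Manager"
--     elif any(senior in position_lower for senior in ["senior", "sr.", "staff"]):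
--         return "Senior"
--     elif any(junior in position_lower for junior in ["junior", "jr.", "associate"]):
--         return "Entry Level"
--     elif any(intern in position_lower for intern in ["intern", "trainee"]):
--         return "Intern"
--     else:
--         return "Mid Level"
-- ===== SOURCE B (Python) =====
-- # Flat keyword->priority table; one pass keeps the MINIMUM rank of any matching
-- # keyword (no per-group short-circuit), then maps that rank to its label.
-- KEYWORD_RANKS = [
--     ("ceo", 0), ("cto", 0), ("cfo", 0), ("coo", 0), ("chief", 0),
--     ("president", 0), ("founder", 0),
--     ("vp", 1), ("vice president", 1),
--     ("director", 2), ("head of", 2),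
--     ("manager", 3), ("lead", 3), ("principal", 3),
--     ("senior", 4), ("sr.", 4), ("staff", 4),
--     ("junior", 5), ("jr.", 5), ("associate", 5),
--     ("intern", 6), ("trainee", 6),
-- ]
--
-- LABELS = ["C-Suite", "VP", "Director", "Manager", "Senior",
--           "Entry Level", "Intern", "Mid Level"]
--
-- def extract_seniority(position):
--     position_lower = position.lower()
--     best = 7  # rank of the fallback "Mid Level"
--     for kw, rank in KEYWORD_RANKS:
--         if rank < best and kw in position_lower:
--             best = rank
--     return LABELS[best]
-- ===== Notes on version B (the rewrite author's own statement) =====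
-- stated objective: alternative
-- what changed: Replaced the ordered if/elif group scan with a single flat pass over a keyword->priority table that keeps the running minimum rank of all matching keywords and maps that rank to a label at the end.
import Mathlib
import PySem

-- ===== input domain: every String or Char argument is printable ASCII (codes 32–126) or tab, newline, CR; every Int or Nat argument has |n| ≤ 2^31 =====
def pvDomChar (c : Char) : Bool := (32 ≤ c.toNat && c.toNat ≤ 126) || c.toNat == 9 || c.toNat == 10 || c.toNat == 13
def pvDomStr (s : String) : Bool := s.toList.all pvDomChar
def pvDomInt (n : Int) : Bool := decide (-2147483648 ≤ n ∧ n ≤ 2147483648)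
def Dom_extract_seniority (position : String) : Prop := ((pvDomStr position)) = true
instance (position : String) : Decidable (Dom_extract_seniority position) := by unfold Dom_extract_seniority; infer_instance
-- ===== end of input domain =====

-- B replaces A's ordered if/elif group scan by a single min-rank pass over a flat keyword->priority table (alternative algorithm, same cost).

-- ===== PORT A =====
def extract_seniority (position : String) : String :=
  let position_lower := PySem.Str.lower position
  if ["ceo", "cto", "cfo", "coo", "chief", "president", "founder"].any
      (fun exec_title => PySem.Str.isIn exec_title position_lower) then "C-Suite"
  else if ["vp", "vice president"].any (fun vp => PySem.Str.isIn vp position_lower) then "VP"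
  else if ["director", "head of"].any (fun dir => PySem.Str.isIn dir position_lower) then "Director"
  else if ["manager", "lead", "principal"].any (fun mgr => PySem.Str.isIn mgr position_lower) then "Manager"
  else if ["senior", "sr.", "staff"].any (fun senior => PySem.Str.isIn senior position_lower) then "Senior"
  else if ["junior", "jr.", "associate"].any (fun junior => PySem.Str.isIn junior position_lower) then "Entry Level"
  else if ["intern", "trainee"].any (fun intern => PySem.Str.isIn intern position_lower) then "Intern"
  else "Mid Level"

-- ===== PORT B =====
def pvKeywordRanks : List (String × Int) :=
  [("ceo", 0), ("cto", 0), ("cfo", 0), ("coo", 0), ("chief", 0),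
   ("president", 0), ("founder", 0),
   ("vp", 1), ("vice president", 1),
   ("director", 2), ("head of", 2),
   ("manager", 3), ("lead", 3), ("principal", 3),
   ("senior", 4), ("sr.", 4), ("staff", 4),
   ("junior", 5), ("jr.", 5), ("associate", 5),
   ("intern", 6), ("trainee", 6)]

def pvLabels : List String :=
  ["C-Suite", "VP", "Director", "Manager", "Senior", "Entry Level", "Intern", "Mid Level"]

-- the loop body: keep the running minimum rank over matching keywords
def pvStep (position_lower : String) (best : Int) (p : String × Int) : Int :=
  if p.2 < best ∧ PySem.Str.isIn p.1 position_lower then p.2 else best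

def extract_seniority_alt (position : String) : String :=
  let position_lower := PySem.Str.lower position
  let best := pvKeywordRanks.foldl (pvStep position_lower) 7
  -- best ∈ [0,7] always, so LABELS[best] never raises; getD "" is unreachable
  (PySem.List.pyGet? pvLabels best).getD ""

-- ===== PRECONDITION & SPEC =====
def Spec_extract_seniority (position : String) (out : String) : Prop := out = extract_seniority_alt position
instance (position : String) (out : String) : Decidable (Spec_extract_seniority position out) := by unfold Spec_extract_seniority; infer_instance

-- ===== CLAIM =====
def Claim_equal_extract_seniority : Prop := ∀ (position : String), Dom_extract_seniority position → Spec_extract_seniority position (extract_seniority position)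

-- ===== LEMMAS AND PROOFS =====

-- pvStep with the membership test abstracted to an arbitrary predicate p
def pvGenStep (p : String → Bool) (best : Int) (q : String × Int) : Int :=
  if q.2 < best ∧ p q.1 then q.2 else best

lemma pvStep_eq_gen (pl : String) :
    pvStep pl = pvGenStep (fun kw => PySem.Str.isIn kw pl) := rfl

-- folding the step over a block of keywords that all carry the same rank r
lemma pv_fold_block (p : String → Bool) (r : Int) (kws : List String) (b : Int) :
    (kws.map (fun kw => (kw, r))).foldl (pvGenStep p) b =
      if r < b ∧ kws.any p then r else b := by
  induction kws generalizing b with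
  | nil => simp
  | cons kw rest ih =>
    simp only [List.map_cons, List.foldl_cons, List.any_cons, pvGenStep, ih, Bool.or_eq_true]
    by_cases hm : p kw = true <;> by_cases hb : r < b <;> simp [hm, hb]

theorem pv_ranks_blocks : pvKeywordRanks =
    (["ceo", "cto", "cfo", "coo", "chief", "president", "founder"].map (fun kw => (kw, (0 : Int)))) ++
    (["vp", "vice president"].map (fun kw => (kw, (1 : Int)))) ++
    (["director", "head of"].map (fun kw => (kw, (2 : Int)))) ++
    (["manager", "lead", "principal"].map (fun kw => (kw, (3 : Int)))) ++
    (["senior", "sr.", "staff"].map (fun kw => (kw, (4 : Int)))) ++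
    (["junior", "jr.", "associate"].map (fun kw => (kw, (5 : Int)))) ++
    (["intern", "trainee"].map (fun kw => (kw, (6 : Int)))) := rfl

-- ===== VERDICT =====
theorem extract_seniority_spec : Claim_equal_extract_seniority := by
  intro position _
  unfold Spec_extract_seniority extract_seniority extract_seniority_alt
  rw [pv_ranks_blocks]
  simp only [pvStep_eq_gen, List.foldl_append, pv_fold_block]
  generalize (["ceo", "cto", "cfo", "coo", "chief", "president", "founder"].any
      (fun kw => PySem.Str.isIn kw (PySem.Str.lower position))) = m0
  generalize (["vp", "vice president"].any
      (fun kw => PySem.Str.isIn kw (PySem.Str.lower position))) = m1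
  generalize (["director", "head of"].any
      (fun kw => PySem.Str.isIn kw (PySem.Str.lower position))) = m2
  generalize (["manager", "lead", "principal"].any
      (fun kw => PySem.Str.isIn kw (PySem.Str.lower position))) = m3
  generalize (["senior", "sr.", "staff"].any
      (fun kw => PySem.Str.isIn kw (PySem.Str.lower position))) = m4
  generalize (["junior", "jr.", "associate"].any
      (fun kw => PySem.Str.isIn kw (PySem.Str.lower position))) = m5
  generalize (["intern", "trainee"].any
      (fun kw => PySem.Str.isIn kw (PySem.Str.lower position))) = m6
  revert m0 m1 m2 m3 m4 m5 m6
  decide
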